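-- pv_equiv track=rewrite | github.com/SaptanshuWanjari/PL-2-Project | src/drift/utils.py | suggest_key_column
-- ===== SOURCE A (Python) =====
-- from typing import Optional
--
-- def suggest_key_column(columns: list[str]) -> Optional[str]:
--     """Suggest a key column based on naming conventions.
--
--     Args:
--         columns: List of column names
--
--     Returns:
--         Suggested key column name or None
--     """
--     # Priority order for key column suggestions
--     key_patterns = ["id", "key", "uuid", "guid"]
--
--     for pattern in key_patterns:
--         # Check for exact match
--         for col in columns:
--             if col.lower() == pattern:
--                 return col
--
--         # Check for suffix match (e.g., user_id, order_id)
--         for col in columns: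
--             if col.lower().endswith(f"_{pattern}"):
--                 return col
--
--     return None
-- ===== SOURCE B (Python) =====
-- from typing import Optional
--
-- def suggest_key_column(columns: list[str]) -> Optional[str]:
--     """Single column-major pass: assign each column its best (pattern, kind)
--     priority and keep the running minimum (ties go to the earlier column)."""
--     key_patterns = ["id", "key", "uuid", "guid"]
--     best = None  # (rank, column) with rank = (pattern_index, 0 for exact / 1 for suffix)
--     for col in columns:
--         low = col.lower()
--         for p, pattern in enumerate(key_patterns):
--             if low == pattern:
--                 rank = (p, 0)
--             elif low.endswith("_" + pattern):
--                 rank = (p, 1)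
--             else:
--                 continue
--             if best is None or rank < best[0]:
--                 best = (rank, col)
--             break
--     return best[1] if best is not None else None
-- ===== Notes on version B (the rewrite author's own statement) =====
-- stated objective: alternative
-- what changed: Replaces A's pattern-major strategy (up to eight separate scans of the column list, one exact and one suffix pass per pattern) by a single column-major pass that assigns each column a lexicographic priority (pattern index, exact-vs-suffix) and keeps the running minimum, ties to the earlier column.
import Mathlib
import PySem

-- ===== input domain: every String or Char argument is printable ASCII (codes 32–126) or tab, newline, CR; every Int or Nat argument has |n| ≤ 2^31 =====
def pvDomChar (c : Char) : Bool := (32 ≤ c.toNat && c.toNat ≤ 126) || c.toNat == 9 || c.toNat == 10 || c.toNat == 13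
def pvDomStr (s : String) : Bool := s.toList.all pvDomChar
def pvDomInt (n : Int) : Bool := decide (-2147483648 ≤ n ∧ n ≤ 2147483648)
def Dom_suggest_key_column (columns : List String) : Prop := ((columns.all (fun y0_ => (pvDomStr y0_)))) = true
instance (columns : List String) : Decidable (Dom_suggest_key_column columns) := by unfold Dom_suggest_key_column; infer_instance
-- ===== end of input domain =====

-- B replaces A's up-to-eight scans of the column list by one column-major pass
-- keeping a running minimal (pattern index, exact-vs-suffix) priority.

-- ===== PORT A =====
-- first column whose lowercase equals the pattern
def findExact (pattern : List Char) : List String → Option String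
  | [] => none
  | col :: rest =>
    if PySem.Chars.lower col.toList = pattern then some col else findExact pattern rest

-- first column whose lowercase ends with "_" + pattern
def findSuffix (pattern : List Char) : List String → Option String
  | [] => none
  | col :: rest =>
    if PySem.Chars.endswith (PySem.Chars.lower col.toList) ('_' :: pattern) then some col
    else findSuffix pattern rest

def keyPatterns : List (List Char) :=
  [['i','d'], ['k','e','y'], ['u','u','i','d'], ['g','u','i','d']]

def suggestGo (columns : List String) : List (List Char) → Option String
  | [] => none
  | pat :: rest =>
    match findExact pat columns with
    | some c => some c
    | none =>
      match findSuffix pat columns with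
      | some c => some c
      | none => suggestGo columns rest

def suggest_key_column (columns : List String) : Option String :=
  suggestGo columns keyPatterns

-- ===== PORT B =====
-- inner loop of Source B: best (pattern index, 0 exact / 1 suffix) rank for one column
def rankFrom (low : List Char) (p : Nat) : List (List Char) → Option (Nat × Nat)
  | [] => none
  | pat :: rest =>
    if low = pat then some (p, 0)
    else if PySem.Chars.endswith low ('_' :: pat) then some (p, 1)
    else rankFrom low (p + 1) rest

-- Python tuple < on the two-component ranks
def ltRank (r b : Nat × Nat) : Bool := r.1 < b.1 || (r.1 == b.1 && r.2 < b.2)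

-- outer loop of Source B: running best (rank, column)
def altLoop (pats : List (List Char)) :
    Option ((Nat × Nat) × String) → List String → Option ((Nat × Nat) × String)
  | best, [] => best
  | best, col :: rest =>
    let best' :=
      match rankFrom (PySem.Chars.lower col.toList) 0 pats with
      | none => best
      | some r =>
        match best with
        | none => some (r, col)
        | some (br, bc) => if ltRank r br then some (r, col) else some (br, bc)
    altLoop pats best' rest

def suggest_key_column_alt (columns : List String) : Option String :=
  (altLoop keyPatterns none columns).map Prod.snd

-- ===== PRECONDITION & SPEC =====
def Spec_suggest_key_column (columns : List String) (out : Option String) : Prop := out = suggest_key_column_alt columns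
instance (columns : List String) (out : Option String) : Decidable (Spec_suggest_key_column columns out) := by unfold Spec_suggest_key_column; infer_instance

-- ===== CLAIM (what is proved, stated in full; the proofs are below) =====
def Claim_equal_suggest_key_column : Prop := ∀ (columns : List String), Dom_suggest_key_column columns → Spec_suggest_key_column columns (suggest_key_column columns)

-- ===== LEMMAS AND PROOFS =====

-- reference value: column-major minimum, ties to the earlier (left) column
def S (pats : List (List Char)) : List String → Option ((Nat × Nat) × String)
  | [] => none
  | col :: rest =>
    match rankFrom (PySem.Chars.lower col.toList) 0 pats, S pats rest with
    | none, b => b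
    | some r, none => some (r, col)
    | some r, some (br, bc) => if ltRank br r then some (br, bc) else some (r, col)

-- merge two "best" candidates, ties to the FIRST (earlier) one
def mergeB : Option ((Nat × Nat) × String) → Option ((Nat × Nat) × String) → Option ((Nat × Nat) × String)
  | none, y => y
  | some b, none => some b
  | some (br, bc), some (r, c) => if ltRank r br then some (r, c) else some (br, bc)

theorem ltRank_trans {a b c : Nat × Nat} (h1 : ltRank a b = true) (h2 : ltRank b c = true) :
    ltRank a c = true := by
  simp [ltRank] at *; omega

theorem ltRank_nlt_trans {a b c : Nat × Nat} (h1 : ltRank c b = false) (h2 : ltRank b a = false) :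
    ltRank c a = false := by
  simp [ltRank] at *; omega

theorem mergeB_assoc (x y z : Option ((Nat × Nat) × String)) :
    mergeB (mergeB x y) z = mergeB x (mergeB y z) := by
  match x, y, z with
  | none, _, _ => simp [mergeB]
  | some (a, ac), none, z => cases z <;> simp [mergeB]
  | some (a, ac), some (b, bc), none =>
    rcases hba : ltRank b a <;> simp [mergeB, hba]
  | some (a, ac), some (b, bc), some (c, cc) =>
    simp only [mergeB]
    by_cases hba : ltRank b a = true
    · by_cases hcb : ltRank c b = true
      · simp [hba, hcb, ltRank_trans hcb hba]
      · simp [hba, hcb]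
    · by_cases hcb : ltRank c b = true
      · simp [hba, hcb]
      · have hca := ltRank_nlt_trans (Bool.eq_false_iff.mpr hcb) (Bool.eq_false_iff.mpr hba)
        simp [hba, hcb, hca]

theorem S_cons_merge (pats : List (List Char)) (col : String) (rest : List String) :
    S pats (col :: rest) =
      mergeB (match rankFrom (PySem.Chars.lower col.toList) 0 pats with
              | none => none
              | some r => some (r, col)) (S pats rest) := by
  rcases h : rankFrom (PySem.Chars.lower col.toList) 0 pats with _ | r
  · simp [S, h, mergeB]
  · rcases hs : S pats rest with _ | ⟨br, bc⟩ <;> simp [S, h, hs, mergeB]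

theorem altLoop_merge (pats : List (List Char)) (cols : List String) :
    ∀ best, altLoop pats best cols = mergeB best (S pats cols) := by
  induction cols with
  | nil => intro best; cases best <;> simp [altLoop, S, mergeB]
  | cons col rest ih =>
    intro best
    rw [S_cons_merge, ← mergeB_assoc]
    rcases h : rankFrom (PySem.Chars.lower col.toList) 0 pats with _ | r
    · cases best <;> simp [altLoop, h, mergeB, ih]
    · rcases best with _ | ⟨br, bc⟩
      · simp [altLoop, h, mergeB, ih]
      · simp only [altLoop, h, mergeB]
        split <;> simp only [ih] <;> rfl

-- membership/rank of the S winner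
theorem S_mem (pats : List (List Char)) :
    ∀ (cols : List String) (br : Nat × Nat) (bc : String), S pats cols = some (br, bc) →
      bc ∈ cols ∧ rankFrom (PySem.Chars.lower bc.toList) 0 pats = some br := by
  intro cols
  induction cols with
  | nil => intro br bc h; simp [S] at h
  | cons col cs ih =>
    intro br bc h
    rcases hr : rankFrom (PySem.Chars.lower col.toList) 0 pats with _ | r <;>
      rcases hs : S pats cs with _ | ⟨cr, cc⟩ <;> simp [S, hr, hs] at h
    · obtain ⟨rfl, rfl⟩ := h
      exact ⟨List.mem_cons_of_mem _ (ih _ _ hs).1, (ih _ _ hs).2⟩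
    · obtain ⟨rfl, rfl⟩ := h; exact ⟨List.mem_cons_self, hr⟩
    · split at h <;> obtain ⟨rfl, rfl⟩ := h
      · exact ⟨List.mem_cons_of_mem _ (ih _ _ hs).1, (ih _ _ hs).2⟩
      · exact ⟨List.mem_cons_self, hr⟩

-- shift lemma for the pattern counter
theorem rankFrom_shift (low : List Char) (l : List (List Char)) :
    ∀ p, rankFrom low (p + 1) l = (rankFrom low p l).map (fun r => (r.1 + 1, r.2)) := by
  induction l with
  | nil => intro p; simp [rankFrom]
  | cons pat rest ih =>
    intro p
    by_cases h1 : low = pat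
    · simp [rankFrom, h1]
    · by_cases h2 : PySem.Chars.endswith low ('_' :: pat) = true <;> simp [rankFrom, h1, h2, ih]

theorem ltRank_shift (a b : Nat × Nat) :
    ltRank (a.1 + 1, a.2) (b.1 + 1, b.2) = ltRank a b := by
  simp [ltRank]

-- characterisation of findExact/findSuffix = none
theorem findExact_none {pat : List Char} {cols : List String} (h : findExact pat cols = none) :
    ∀ x ∈ cols, ¬ PySem.Chars.lower x.toList = pat := by
  induction cols with
  | nil => simp
  | cons col rest ih =>
    by_cases hc : PySem.Chars.lower col.toList = pat
    · simp [findExact, hc] at h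
    · simp [findExact, hc] at h
      intro x hx
      rcases List.mem_cons.mp hx with rfl | hx
      · exact hc
      · exact ih h x hx

theorem findSuffix_none {pat : List Char} {cols : List String} (h : findSuffix pat cols = none) :
    ∀ x ∈ cols, ¬ PySem.Chars.endswith (PySem.Chars.lower x.toList) ('_' :: pat) = true := by
  induction cols with
  | nil => simp
  | cons col rest ih =>
    by_cases hc : PySem.Chars.endswith (PySem.Chars.lower col.toList) ('_' :: pat) = true
    · simp [findSuffix, hc] at h
    · simp [findSuffix, hc] at h
      intro x hx
      rcases List.mem_cons.mp hx with rfl | hx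
      · exact hc
      · exact ih h x hx

-- when a column matches neither form of pat, its rank over pat::rest is the shifted rank over rest
theorem rank_cons_no_match {low pat : List Char} {rest : List (List Char)}
    (h1 : ¬ low = pat) (h2 : ¬ PySem.Chars.endswith low ('_' :: pat) = true) :
    rankFrom low 0 (pat :: rest) = (rankFrom low 0 rest).map (fun r => (r.1 + 1, r.2)) := by
  simp [rankFrom, h1, h2, rankFrom_shift]

-- S is invariant (up to the shift) under dropping an unmatched leading pattern
theorem S_shift {pat : List Char} {rest : List (List Char)} {cols : List String}
    (hE : ∀ x ∈ cols, ¬ PySem.Chars.lower x.toList = pat)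
    (hS : ∀ x ∈ cols, ¬ PySem.Chars.endswith (PySem.Chars.lower x.toList) ('_' :: pat) = true) :
    S (pat :: rest) cols = (S rest cols).map (fun p => ((p.1.1 + 1, p.1.2), p.2)) := by
  induction cols with
  | nil => simp [S]
  | cons col cs ih =>
    have hcol := rank_cons_no_match (rest := rest) (hE col (by simp)) (hS col (by simp))
    have ih' := ih (fun x hx => hE x (by simp [hx])) (fun x hx => hS x (by simp [hx]))
    rcases hr : rankFrom (PySem.Chars.lower col.toList) 0 rest with _ | r <;>
      rcases hs : S rest cs with _ | ⟨br, bc⟩ <;>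
        simp [S, hcol, hr, hs, ih', ltRank_shift] at * <;> (try split) <;> simp

-- the winner when the first pattern has an exact match
theorem S_exact {pat : List Char} {rest : List (List Char)} {cols : List String} {c : String}
    (h : findExact pat cols = some c) : S (pat :: rest) cols = some ((0, 0), c) := by
  induction cols with
  | nil => simp [findExact] at h
  | cons col cs ih =>
    by_cases hc : PySem.Chars.lower col.toList = pat
    · simp [findExact, hc] at h; subst h
      have hr : rankFrom (PySem.Chars.lower col.toList) 0 (pat :: rest) = some (0, 0) := by
        simp [rankFrom, hc]
      rcases hs : S (pat :: rest) cs with _ | ⟨br, bc⟩ <;>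
        simp [S, hr, hs, ltRank]
    · simp [findExact, hc] at h
      have ih' := ih h
      rcases hr : rankFrom (PySem.Chars.lower col.toList) 0 (pat :: rest) with _ | r
      · simp [S, hr, ih']
      · have hlt : ltRank (0, 0) r = true := by
          by_cases h2 : PySem.Chars.endswith (PySem.Chars.lower col.toList) ('_' :: pat) = true
          · simp [rankFrom, hc, h2] at hr; subst hr; simp [ltRank]
          · rw [rank_cons_no_match hc h2] at hr
            rcases hq : rankFrom (PySem.Chars.lower col.toList) 0 rest with _ | q <;>
              simp [hq] at hr
            subst hr; simp [ltRank]
        simp [S, hr, ih', hlt]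

-- the winner when the first pattern has no exact match but a suffix match
theorem S_suffix {pat : List Char} {rest : List (List Char)} {cols : List String} {c : String}
    (hE : findExact pat cols = none) (h : findSuffix pat cols = some c) :
    S (pat :: rest) cols = some ((0, 1), c) := by
  induction cols with
  | nil => simp [findSuffix] at h
  | cons col cs ih =>
    have hcE : ¬ PySem.Chars.lower col.toList = pat := findExact_none hE col (by simp)
    have hE' : findExact pat cs = none := by simpa [findExact, hcE] using hE
    by_cases hc : PySem.Chars.endswith (PySem.Chars.lower col.toList) ('_' :: pat) = true
    · simp [findSuffix, hc] at h; subst h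
      have hr : rankFrom (PySem.Chars.lower col.toList) 0 (pat :: rest) = some (0, 1) := by
        simp [rankFrom, hcE, hc]
      rcases hs : S (pat :: rest) cs with _ | ⟨br, bc⟩
      · simp [S, hr, hs]
      · have hmem := S_mem (pat :: rest) cs br bc hs
        have hbE : ¬ PySem.Chars.lower bc.toList = pat := findExact_none hE' bc hmem.1
        have hnlt : ltRank br (0, 1) = false := by
          by_cases hb2 : PySem.Chars.endswith (PySem.Chars.lower bc.toList) ('_' :: pat) = true
          · have : rankFrom (PySem.Chars.lower bc.toList) 0 (pat :: rest) = some (0, 1) := by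
              simp [rankFrom, hbE, hb2]
            rw [hmem.2] at this; simp at this; simp [this, ltRank]
          · have := hmem.2; rw [rank_cons_no_match hbE hb2] at this
            rcases hq : rankFrom (PySem.Chars.lower bc.toList) 0 rest with _ | q <;>
              simp [hq] at this
            subst this; simp [ltRank]
        simp [S, hr, hs, hnlt]
    · simp [findSuffix, hc] at h
      have ih' := ih hE' h
      rcases hr : rankFrom (PySem.Chars.lower col.toList) 0 (pat :: rest) with _ | r
      · simp [S, hr, ih']
      · have hlt : ltRank (0, 1) r = true := by
          rw [rank_cons_no_match hcE hc] at hr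
          rcases hq : rankFrom (PySem.Chars.lower col.toList) 0 rest with _ | q <;>
            simp [hq] at hr
          subst hr; simp [ltRank]
        simp [S, hr, ih', hlt]

theorem S_nil_pats (cols : List String) : S [] cols = none := by
  induction cols with
  | nil => simp [S]
  | cons col cs ih => simp [S, rankFrom, ih]

-- A equals the column-major minimum
theorem suggestGo_eq_S (pats : List (List Char)) (cols : List String) :
    suggestGo cols pats = (S pats cols).map Prod.snd := by
  induction pats with
  | nil => simp [suggestGo, S_nil_pats]
  | cons pat rest ih =>
    rcases hE : findExact pat cols with _ | c
    · rcases hS : findSuffix pat cols with _ | c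
      · rw [S_shift (findExact_none hE) (findSuffix_none hS)]
        simp [suggestGo, hE, hS, ih]
        rcases hs : S rest cols with _ | ⟨br, bc⟩ <;> simp
      · simp [suggestGo, hE, hS, S_suffix hE hS]
    · simp [suggestGo, hE, S_exact hE]

-- ===== VERDICT (by name: the statement is the Claim_ definition above) =====
theorem suggest_key_column_spec : Claim_equal_suggest_key_column := by
  intro columns _
  show suggest_key_column columns = suggest_key_column_alt columns
  rw [suggest_key_column, suggest_key_column_alt, altLoop_merge, suggestGo_eq_S]
  rfl
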